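-- pv_equiv track=rewrite | github.com/bartosz-zelek/bioinformatics | exact algorithm/tmp.py | construct_sequence
-- ===== SOURCE A (Python) =====
-- def find_overlaps(oligo1, oligos):
--     overlaps = []
--     for oligo2 in oligos:
--         if oligo1[1:] == oligo2[:-1]:
--             overlaps.append(oligo2)
--     return overlaps
--
-- def construct_sequence(solution, oligos):
--     if not oligos:
--         yield solution
--     overlaps = find_overlaps(solution[-1], oligos)
--     if not overlaps:
--         yield solution
--     for oligo in overlaps:
--         if oligo not in solution:
--             solution_cpy = solution.copy()
--             solution_cpy.append(oligo)
--
--             oligos_cpy = oligos.copy()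
--             oligos_cpy.remove(oligo)
--             yield from construct_sequence(solution_cpy, oligos_cpy)
-- ===== SOURCE B (Python) =====
-- def construct_sequence(solution, oligos):
--     # Iterative DFS with an explicit stack instead of A's recursive generator.
--     stack = [(list(solution), list(oligos))]
--     while stack:
--         path, remaining = stack.pop()
--         tail = path[-1][1:]
--         if not remaining:
--             yield path
--         succ = [o for o in remaining if o[:-1] == tail]
--         if not succ:
--             yield path
--         children = []
--         for o in succ:
--             if o not in path:
--                 rest = remaining.copy()
--                 rest.remove(o)
--                 children.append((path + [o], rest))
--         stack.extend(reversed(children))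
-- ===== Notes on version B (the rewrite author's own statement) =====
-- stated objective: alternative
-- what changed: A's recursive generator (with list copies per call) is replaced by an iterative depth-first search over an explicit stack of (path, remaining) frames, yielding the same reconstructions in the same order.
import Mathlib
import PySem

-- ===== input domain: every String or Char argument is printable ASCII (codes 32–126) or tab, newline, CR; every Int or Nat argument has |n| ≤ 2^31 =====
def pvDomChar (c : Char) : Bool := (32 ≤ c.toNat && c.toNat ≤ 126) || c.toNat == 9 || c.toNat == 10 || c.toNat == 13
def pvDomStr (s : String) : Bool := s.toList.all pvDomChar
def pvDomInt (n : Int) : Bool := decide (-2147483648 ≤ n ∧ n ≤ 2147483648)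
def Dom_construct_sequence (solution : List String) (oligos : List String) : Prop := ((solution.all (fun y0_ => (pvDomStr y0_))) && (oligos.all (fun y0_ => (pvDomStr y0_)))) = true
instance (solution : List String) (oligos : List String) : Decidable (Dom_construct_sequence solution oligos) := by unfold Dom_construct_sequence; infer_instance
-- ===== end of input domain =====

-- B replaces A's recursive generator by an iterative depth-first search over an explicit
-- stack of (path, remaining-oligos) frames; same yields in the same order (alternative
-- decomposition, no speed claim); equivalence is about the materialised list of yields.

-- ===== PORT A =====
def find_overlaps (oligo1 : String) (oligos : List String) : List String :=
  oligos.foldl (fun overlaps oligo2 =>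
    if PySem.Str.slice oligo1 (some 1) none == PySem.Str.slice oligo2 none (some (-1))
    then overlaps ++ [oligo2] else overlaps) []

-- fuel only makes the recursion total; fuel = oligos.length + 1 always suffices,
-- since each recursive call removes exactly one oligo.
def csA : Nat → List String → List String → List (List String)
  | 0, _, _ => []
  | fuel+1, solution, oligos =>
    -- 'if not oligos: yield solution'
    (if oligos.isEmpty then [solution] else []) ++
    (match PySem.List.pyGet? solution (-1) with
     | none => []   -- solution[-1] raises IndexError (excluded by Pre_)
     | some last =>
       -- 'if not overlaps: yield solution'
       (if (find_overlaps last oligos).isEmpty then [solution] else []) ++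
       -- 'for oligo in overlaps: if oligo not in solution: … yield from construct_sequence(…)'
       (find_overlaps last oligos).foldl (fun acc oligo =>
         if !solution.contains oligo then
           acc ++ (match PySem.List.remove? oligos oligo with
                   | some oligos' => csA fuel (solution ++ [oligo]) oligos'
                   | none => [])   -- unreachable: oligo ∈ overlaps ⊆ oligos
         else acc) [])

def construct_sequence (solution : List String) (oligos : List String) : List (List String) :=
  csA (oligos.length + 1) solution oligos

-- ===== PORT B =====
-- the stack is modelled top-first: stack.pop() takes the head, and
-- stack.extend(reversed(children)) makes the new stack 'children ++ rest'.
-- Fuel only bounds the number of pops; factorial (n+1) always suffices.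
def runB : Nat → List (List String × List String) → List (List String)
  | 0, _ => []
  | _+1, [] => []
  | fuel+1, (path, remaining) :: rest =>
    match PySem.List.pyGet? path (-1) with
    | none => []   -- path[-1] raises IndexError (excluded by Pre_)
    | some lastO =>
      -- 'if not remaining: yield path'
      (if remaining.isEmpty then [path] else []) ++
      -- succ = [o for o in remaining if o[:-1] == tail]; 'if not succ: yield path'
      (if (remaining.filter (fun o => PySem.Str.slice o none (some (-1)) == PySem.Str.slice lastO (some 1) none)).isEmpty then [path] else []) ++
      -- children built left to right, then pushed so the first child is popped next
      runB fuel
        ((remaining.filter (fun o => PySem.Str.slice o none (some (-1)) == PySem.Str.slice lastO (some 1) none)).foldl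
          (fun cs o =>
            if !path.contains o then
              (match PySem.List.remove? remaining o with
               | some rem' => cs ++ [(path ++ [o], rem')]
               | none => cs)
            else cs) []
         ++ rest)

def construct_sequence_alt (solution : List String) (oligos : List String) : List (List String) :=
  runB (Nat.factorial (oligos.length + 1)) [(solution, oligos)]

-- ===== PRECONDITION & SPEC =====
-- Pre_ excludes only solution = [], where Python A raises IndexError on solution[-1]
-- (after a first yield when oligos is empty, so materialising still raises); B raises there too.
def Pre_construct_sequence (solution : List String) (oligos : List String) : Prop := solution ≠ []
instance (solution : List String) (oligos : List String) : Decidable (Pre_construct_sequence solution oligos) := by unfold Pre_construct_sequence; infer_instance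

def pvWitness_construct_sequence : List String × List String := (["ab"], ["bc", "cd"])

def Spec_construct_sequence (solution : List String) (oligos : List String) (out : List (List String)) : Prop := out = construct_sequence_alt solution oligos
instance (solution : List String) (oligos : List String) (out : List (List String)) : Decidable (Spec_construct_sequence solution oligos out) := by unfold Spec_construct_sequence; infer_instance

-- ===== CLAIM (what is proved, stated in full; the proofs are below) =====
def Claim_equal_construct_sequence : Prop := ∀ (solution : List String) (oligos : List String), Dom_construct_sequence solution oligos → Pre_construct_sequence solution oligos → Spec_construct_sequence solution oligos (construct_sequence solution oligos)

-- ===== LEMMAS AND PROOFS =====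

theorem find_overlaps_eq_filter (oligo1 : String) (oligos : List String) :
    find_overlaps oligo1 oligos =
      oligos.filter (fun oligo2 =>
        PySem.Str.slice oligo1 (some 1) none == PySem.Str.slice oligo2 none (some (-1))) := by
  unfold find_overlaps
  rw [PySem.List.foldl_append_if_eq_filter]
  rfl

-- the canonical-fuel unfolding of A's port: one clean recurrence
theorem cs_unfold (solution oligos : List String) :
    construct_sequence solution oligos =
      (if oligos.isEmpty then [solution] else []) ++
      (match PySem.List.pyGet? solution (-1) with
       | none => []
       | some last =>
         (if (find_overlaps last oligos).isEmpty then [solution] else []) ++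
         (find_overlaps last oligos).foldl (fun acc oligo =>
           if !solution.contains oligo then
             acc ++ construct_sequence (solution ++ [oligo]) (oligos.erase oligo)
           else acc) []) := by
  have hdef : construct_sequence solution oligos = csA (oligos.length + 1) solution oligos := rfl
  rw [hdef]
  simp only [csA]
  congr 1
  cases h : PySem.List.pyGet? solution (-1) with
  | none => rfl
  | some last =>
    simp only []
    congr 1
    apply PySem.List.foldl_congr_mem
    intro acc o ho
    have hmem : o ∈ oligos := by
      rw [find_overlaps_eq_filter] at ho
      exact List.mem_of_mem_filter ho
    have hpos : 0 < oligos.length := List.length_pos_of_mem hmem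
    have hlen : (oligos.erase o).length + 1 = oligos.length := by
      rw [List.length_erase_of_mem hmem]; omega
    congr 1
    rw [PySem.List.remove?_eq_some_erase oligos o hmem, ← hlen]
    rfl

-- strings: (a == b) = (b == a)
theorem pv_beq_symm (a b : String) : (a == b) = (b == a) := by
  rw [Bool.eq_iff_iff]
  simp only [beq_iff_eq]
  exact eq_comm

-- (l.filter p).flatMap g, pushed through the filter
theorem pv_flatMap_filter {α β : Type} (p : α → Bool) (g : α → List β) (l : List α) :
    (l.filter p).flatMap g = l.flatMap (fun x => if p x then g x else []) := by
  induction l with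
  | nil => rfl
  | cons x xs ih => by_cases h : p x <;> simp [h, ih]

-- the stack measure: factorial-weighted remaining sizes; it strictly decreases at each pop
def stackM (st : List (List String × List String)) : Nat :=
  (st.map (fun pr => (pr.2.length + 1).factorial)).sum

theorem stackM_append (a b : List (List String × List String)) :
    stackM (a ++ b) = stackM a + stackM b := by
  simp [stackM]

-- B's stack loop, run with enough fuel, emits each frame's A-subtree in order
theorem runB_spec (fuel : Nat) : ∀ (st : List (List String × List String)),
    (∀ pr ∈ st, pr.1 ≠ []) → stackM st ≤ fuel →
    runB fuel st = st.flatMap (fun pr => construct_sequence pr.1 pr.2) := by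
  induction fuel with
  | zero =>
    intro st hne hf
    match st with
    | [] => rfl
    | (p, r) :: rest =>
      exfalso
      have hpos := Nat.factorial_pos (r.length + 1)
      simp only [stackM, List.map_cons, List.sum_cons, Nat.le_zero] at hf
      omega
  | succ fuel ih =>
    intro st hne hf
    match st with
    | [] => rfl
    | (p, r) :: rest =>
      have hp : p ≠ [] := hne (p, r) (List.mem_cons_self)
      obtain ⟨lst, hlst⟩ : ∃ x, PySem.List.pyGet? p (-1) = some x := by
        rw [PySem.List.pyGet?_neg_one]
        exact Option.isSome_iff_exists.mp (List.getLast?_isSome.mpr hp)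
      simp only [runB, hlst]
      have hfilter : (r.filter (fun o =>
            PySem.Str.slice o none (some (-1)) == PySem.Str.slice lst (some 1) none))
          = find_overlaps lst r := by
        rw [find_overlaps_eq_filter]
        exact List.filter_congr (fun x _ => pv_beq_symm _ _)
      rw [hfilter]
      have hchildren : (find_overlaps lst r).foldl (fun cs o =>
            if !p.contains o then
              (match PySem.List.remove? r o with
               | some rem' => cs ++ [(p ++ [o], rem')]
               | none => cs)
            else cs) []
          = ((find_overlaps lst r).filter (fun o => !p.contains o)).map
              (fun o => (p ++ [o], r.erase o)) := by
        rw [PySem.List.foldl_congr_mem _ _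
          (fun cs o => if !p.contains o then cs ++ [(p ++ [o], r.erase o)] else cs) _ ?_]
        · rw [PySem.List.foldl_append_if]; rfl
        · intro acc o ho
          have hmem : o ∈ r := by
            rw [find_overlaps_eq_filter] at ho
            exact List.mem_of_mem_filter ho
          congr 1
          rw [PySem.List.remove?_eq_some_erase r o hmem]
      rw [hchildren]
      -- fuel bookkeeping for the recursive call
      have hlenM : ∀ o ∈ (find_overlaps lst r).filter (fun o => !p.contains o),
          ((r.erase o).length + 1).factorial = r.length.factorial := by
        intro o ho
        have hmem : o ∈ r := by
          rw [find_overlaps_eq_filter] at ho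
          exact List.mem_of_mem_filter (List.mem_of_mem_filter ho)
        have hpos : 0 < r.length := List.length_pos_of_mem hmem
        rw [List.length_erase_of_mem hmem]
        congr 1
        omega
      have hMch : stackM (((find_overlaps lst r).filter (fun o => !p.contains o)).map
            (fun o => (p ++ [o], r.erase o))) ≤ r.length * r.length.factorial := by
        unfold stackM
        rw [List.map_map]
        have hb := List.sum_le_card_nsmul
          (((find_overlaps lst r).filter (fun o => !p.contains o)).map
            ((fun pr => (pr.2.length + 1).factorial) ∘ (fun o => (p ++ [o], r.erase o))))
          r.length.factorial ?_
        · refine le_trans hb ?_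
          rw [List.length_map, smul_eq_mul]
          have hc : ((find_overlaps lst r).filter (fun o => !p.contains o)).length ≤ r.length := by
            calc ((find_overlaps lst r).filter (fun o => !p.contains o)).length
                ≤ (find_overlaps lst r).length := List.length_filter_le _ _
              _ ≤ r.length := by
                  rw [find_overlaps_eq_filter]; exact List.length_filter_le _ _
          exact Nat.mul_le_mul_right _ hc
        · intro x hx
          obtain ⟨o, ho, rfl⟩ := List.mem_map.mp hx
          exact le_of_eq (hlenM o ho)
      have hfM : stackM ((p, r) :: rest) ≤ fuel + 1 := hf
      have hfact : (r.length + 1).factorial = (r.length + 1) * r.length.factorial :=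
        Nat.factorial_succ _
      have hfpos : 0 < r.length.factorial := Nat.factorial_pos _
      have hM1 : stackM ((p, r) :: rest) = (r.length + 1).factorial + stackM rest := by
        simp [stackM]
      rw [ih _ ?_ ?_]
      · -- list algebra: both sides are e1 ++ e2 ++ (children-subtrees ++ rest-subtrees)
        rw [List.flatMap_append, List.flatMap_map, pv_flatMap_filter,
          List.flatMap_cons, cs_unfold p r, hlst]
        simp only []
        have hA : (find_overlaps lst r).foldl (fun acc o =>
              if !p.contains o then
                acc ++ construct_sequence (p ++ [o]) (r.erase o)
              else acc) []
            = (find_overlaps lst r).flatMap (fun o =>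
                if !p.contains o then construct_sequence (p ++ [o]) (r.erase o) else []) := by
          rw [PySem.List.foldl_congr_mem _ _
            (fun acc o => acc ++ (if !p.contains o then
              construct_sequence (p ++ [o]) (r.erase o) else [])) _ ?_]
          · rw [PySem.List.foldl_append_eq_flatMap]; rfl
          · intro acc o _
            by_cases hc : o ∈ p <;> simp [hc]
        rw [hA]
        simp [List.append_assoc]
      · intro pr hpr
        rcases List.mem_append.mp hpr with hin | hin
        · obtain ⟨o, _, rfl⟩ := List.mem_map.mp hin
          simp
        · exact hne pr (List.mem_cons_of_mem _ hin)
      · rw [stackM_append]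
        rw [hM1] at hfM
        have hmul : (r.length + 1) * r.length.factorial
            = r.length * r.length.factorial + r.length.factorial := by ring
        omega

-- ===== VERDICT (by name: the statement is the Claim_ definition above) =====
theorem construct_sequence_spec : Claim_equal_construct_sequence := by
  intro solution oligos _ hpre
  unfold Spec_construct_sequence construct_sequence_alt
  rw [runB_spec]
  · simp
  · intro pr hpr
    simp only [List.mem_singleton] at hpr
    subst hpr
    exact hpre
  · simp [stackM]
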